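-- pv_equiv track=rewrite | github.com/chitly/HashCode2019 | QualificationRound/solution_First.py | get_score_table
-- ===== SOURCE A (Python) =====
-- def get_score_table(pics):
--     score_table = {}
--     for i in range(len(pics)):
--         for j in range(i + 1, len(pics)):
--             r = len(pics[i]['tags'] & pics[j]['tags'])
--             p = len(pics[i]['tags']) - r
--             q = len(pics[j]['tags']) - r
--             score = min([r, p, q])
--             if i not in score_table:
--                 score_table[i] = []
--             if j not in score_table:
--                 score_table[j] = []
--             score_table[i].append((score, j))
--             score_table[j].append((score, i))
--     for idx in score_table:
--         score_table[idx].sort(key=lambda x: -x[0])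
--     return score_table
-- ===== SOURCE B (Python) =====
-- def get_score_table(pics):
--     n = len(pics)
--     if n < 2:
--         return {}
--     # inverted index: tag -> pictures carrying it (in increasing index order)
--     index = {}
--     for i in range(n):
--         for t in pics[i]['tags']:
--             index.setdefault(t, []).append(i)
--     table = {}
--     for i in range(n):
--         li = len(pics[i]['tags'])
--         # overlap counter: c[k] = |tags_i & tags_k|, via the index (no per-pair set intersection)
--         c = {}
--         for t in pics[i]['tags']:
--             for k in index[t]:
--                 c[k] = c.get(k, 0) + 1
--         row = []
--         for k in range(n):
--             if k == i:
--                 continue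
--             r = c.get(k, 0)
--             row.append((min(r, li - r, len(pics[k]['tags']) - r), k))
--         table[i] = sorted(row, key=lambda x: -x[0])
--     return table
-- ===== Notes on version B (the rewrite author's own statement) =====
-- stated objective: alternative
-- what changed: Replaces A's per-pair set intersections over the upper triangle with mirrored appends by a one-pass inverted index (tag -> pictures) from which each picture's overlap counts with all others are read off a counter, building each row independently, sorting it descending and inserting it directly.
import Mathlib
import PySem

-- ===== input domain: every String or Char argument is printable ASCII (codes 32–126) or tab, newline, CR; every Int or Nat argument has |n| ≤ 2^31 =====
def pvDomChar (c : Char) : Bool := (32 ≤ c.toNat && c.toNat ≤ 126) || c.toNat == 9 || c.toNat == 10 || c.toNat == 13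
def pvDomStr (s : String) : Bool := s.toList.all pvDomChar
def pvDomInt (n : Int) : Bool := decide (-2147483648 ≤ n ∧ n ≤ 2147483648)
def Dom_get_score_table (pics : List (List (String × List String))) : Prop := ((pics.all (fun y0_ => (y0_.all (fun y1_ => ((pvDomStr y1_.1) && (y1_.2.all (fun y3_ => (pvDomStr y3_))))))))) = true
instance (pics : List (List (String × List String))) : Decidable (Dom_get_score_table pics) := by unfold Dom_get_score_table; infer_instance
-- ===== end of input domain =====

-- B replaces A's per-pair set intersections over the upper triangle (with mirrored appends and a
-- final sort pass) by a one-pass inverted index tag -> pictures, from which each picture's overlap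
-- counts with all others are read off a counter; each row is then assembled, sorted and inserted
-- independently. Alternative decomposition, same output.

-- ===== PORT A =====
-- pics[k]['tags']: each picture is a dict, its 'tags' value a Python set (PySem.Set).
-- Indexing k is always in range; the 'tags' lookup is exact under Pre_ (the key is present),
-- so pyGetD / Dict.getD with a dummy default are exact there.
def pvTagsAt (pics : List (List (String × List String))) (k : Int) : PySem.Set String :=
  PySem.Set.ofList ((PySem.Dict.mk (PySem.List.pyGetD pics k [])).getD "tags" [])

-- r = len(ti & tj); score = min of the three ints
def pvScore (pics : List (List (String × List String))) (i j : Int) : Int :=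
  let ti := pvTagsAt pics i
  let tj := pvTagsAt pics j
  let r := PySem.Set.len (PySem.Set.inter ti tj)
  min r (min (PySem.Set.len ti - r) (PySem.Set.len tj - r))

def get_score_table (pics : List (List (String × List String))) : List (Int × List (Int × Int)) :=
  let n : Int := pics.length
  let st : PySem.Dict Int (List (Int × Int)) :=
    (PySem.List.pyRange 0 n 1).foldl (fun st i =>
      (PySem.List.pyRange (i + 1) n 1).foldl (fun st j =>
        let score := pvScore pics i j
        let st := if st.contains i then st else st.insert i []
        let st := if st.contains j then st else st.insert j []
        let st := st.modify i [] (fun l => l ++ [(score, j)])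
        st.modify j [] (fun l => l ++ [(score, i)])) st) PySem.Dict.empty
  -- for idx in score_table: score_table[idx].sort(key=lambda x: -x[0])  (keys are not mutated)
  let st := st.keys.foldl (fun st idx =>
    st.modify idx [] (fun l => PySem.List.sorted l (fun x => -x.1) false)) st
  st.items

-- ===== PORT B =====
-- inverted index tag -> picture indices (setdefault+append = Dict.modify with default []);
-- per picture i a counter c with c[k] = overlap of i and k, read via c.get(k, 0);
-- index[t] is always present when read (t comes from picture i, which was indexed), so getD is exact.
def get_score_table_alt (pics : List (List (String × List String))) : List (Int × List (Int × Int)) :=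
  let n : Int := pics.length
  if n < 2 then [] else
  let index : PySem.Dict String (List Int) :=
    (PySem.List.pyRange 0 n 1).foldl (fun index i =>
      (pvTagsAt pics i).foldl (fun index t => index.modify t [] (fun l => l ++ [i])) index)
      PySem.Dict.empty
  (PySem.List.pyRange 0 n 1).foldl (fun table i =>
    let li := PySem.Set.len (pvTagsAt pics i)
    let c : PySem.Dict Int Int :=
      (pvTagsAt pics i).foldl (fun c t =>
        (index.getD t []).foldl (fun c k => c.modify k 0 (fun v => v + 1)) c) PySem.Dict.empty
    let row := (PySem.List.pyRange 0 n 1).foldl (fun row k =>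
      if k = i then row
      else
        let r := c.getD k 0
        row ++ [(min r (min (li - r) (PySem.Set.len (pvTagsAt pics k) - r)), k)]) []
    table ++ [(i, PySem.List.sorted row (fun x => -x.1) false)]) []

-- ===== PRECONDITION & SPEC =====
-- Pre_ excludes exactly the inputs on which the Python A raises KeyError: with at least two
-- pictures, every picture dict must carry the key 'tags' (with 0 or 1 pictures nothing is looked up).
def Pre_get_score_table (pics : List (List (String × List String))) : Prop :=
  pics.length ≤ 1 ∨ ∀ p ∈ pics, (PySem.Dict.mk p).contains "tags" = true
instance (pics : List (List (String × List String))) : Decidable (Pre_get_score_table pics) := by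
  unfold Pre_get_score_table; infer_instance

def pvWitness_get_score_table : (List (List (String × List String))) :=
  [[("tags", ["a", "b"])], [("tags", ["b", "c"])], [("tags", ["a"])]]

def Spec_get_score_table (pics : List (List (String × List String))) (out : List (Int × List (Int × Int))) : Prop := out = get_score_table_alt pics
instance (pics : List (List (String × List String))) (out : List (Int × List (Int × Int))) : Decidable (Spec_get_score_table pics out) := by unfold Spec_get_score_table; infer_instance

-- ===== CLAIM (what is proved, stated in full; the proofs are below) =====
def Claim_equal_get_score_table : Prop := ∀ (pics : List (List (String × List String))), Dom_get_score_table pics → Pre_get_score_table pics → Spec_get_score_table pics (get_score_table pics)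

-- ===== LEMMAS AND PROOFS =====

theorem pv_foldl_skip {γ β : Type} (p : γ → Prop) [DecidablePred p] (f : γ → β) :
    ∀ (l : List γ) (acc : List β),
    l.foldl (fun acc x => if p x then acc else acc ++ [f x]) acc
      = acc ++ (l.filter (fun x => !decide (p x))).map f := by
  intro l
  induction l with
  | nil => simp
  | cons x xs ih =>
    intro acc
    by_cases h : p x <;> simp [h, ih]

theorem pv_foldl_flatMap {γ δ ε : Type} (g : γ → List δ) (f : ε → δ → ε) :
    ∀ (xs : List γ) (init : ε),
    (xs.flatMap g).foldl f init = xs.foldl (fun a x => (g x).foldl f a) init := by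
  intro xs
  induction xs with
  | nil => simp
  | cons x xs ih => intro init; simp [List.foldl_append, ih]

theorem pv_inter_len (s t : PySem.Set String) (hs : s.Nodup) (ht : t.Nodup) :
    PySem.Set.len (PySem.Set.inter s t) = PySem.Set.len (PySem.Set.inter t s) := by
  unfold PySem.Set.len
  congr 1
  have hp : (PySem.Set.inter s t).Perm (PySem.Set.inter t s) := by
    rw [List.perm_ext_iff_of_nodup ((PySem.Set.nodup_inter s t hs)) ((PySem.Set.nodup_inter t s ht))]
    intro y
    simp only [PySem.Set.mem_inter]
    tauto
  exact hp.length_eq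


def pvStep (pics : List (List (String × List String)))
    (st : PySem.Dict Int (List (Int × Int))) (i j : Int) : PySem.Dict Int (List (Int × Int)) :=
  let score := pvScore pics i j
  let st := if st.contains i then st else st.insert i []
  let st := if st.contains j then st else st.insert j []
  let st := st.modify i [] (fun l => l ++ [(score, j)])
  st.modify j [] (fun l => l ++ [(score, i)])

def pvKeys (P : List (Int × Int)) : List Int := PySem.Set.ofList (P.flatMap (fun p => [p.1, p.2]))

def pvEntries (pics : List (List (String × List String))) (P : List (Int × Int)) (m : Int) :
    List (Int × Int) :=
  P.filterMap (fun p =>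
    if p.1 = m then some (pvScore pics p.1 p.2, p.2)
    else if p.2 = m then some (pvScore pics p.1 p.2, p.1) else none)

-- keys of a shaped dict
theorem pv_keys_shape (M : List Int) (g : Int → List (Int × Int))
    (d : PySem.Dict Int (List (Int × Int))) (hd : d.items = M.map (fun m => (m, g m))) :
    d.keys = M := by
  unfold PySem.Dict.keys
  rw [hd, List.map_map]
  exact List.map_id M

theorem pv_contains_shape (M : List Int) (g : Int → List (Int × Int))
    (d : PySem.Dict Int (List (Int × Int))) (hd : d.items = M.map (fun m => (m, g m)))
    (a : Int) : d.contains a = decide (a ∈ M) := by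
  rw [PySem.Dict.contains_eq_decide_mem_keys, pv_keys_shape M g d hd]

theorem pv_items_modify (M : List Int) (g : Int → List (Int × Int))
    (d : PySem.Dict Int (List (Int × Int))) (hM : M.Nodup)
    (hd : d.items = M.map (fun m => (m, g m))) (a : Int) (ha : a ∈ M)
    (f : List (Int × Int) → List (Int × Int)) :
    (d.modify a [] f).items = M.map (fun m => (m, if m = a then f (g m) else g m)) := by
  have hkeys : d.keys = M := pv_keys_shape M g d hd
  have hmem : (a, g a) ∈ d.items := by rw [hd]; exact List.mem_map_of_mem ha
  have hget : d.getD a [] = g a :=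
    PySem.Dict.getD_of_mem_items d hmem (by rw [hkeys]; exact hM) []
  have hcont : d.contains a = true := by
    rw [pv_contains_shape M g d hd]; simpa using ha
  show (d.insert a (f (d.getD a []))).items = _
  rw [PySem.Dict.items_insert_of_contains d _ hcont, hget, hd, List.map_map]
  apply List.map_congr_left
  intro m hm
  by_cases h : m = a <;> simp [h]

theorem pv_items_insert_fresh (M : List Int) (g : Int → List (Int × Int))
    (d : PySem.Dict Int (List (Int × Int)))
    (hd : d.items = M.map (fun m => (m, g m))) (a : Int) (ha : a ∉ M)
    (hga : g a = []) :
    (d.insert a []).items = (M ++ [a]).map (fun m => (m, g m)) := by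
  have hcont : d.contains a = false := by
    rw [pv_contains_shape M g d hd]; simpa using ha
  rw [PySem.Dict.items_insert_of_not_contains d _ hcont, hd]
  simp [hga]

theorem pv_nodup_add (M : List Int) (hM : M.Nodup) (a : Int) : (PySem.Set.add M a).Nodup := by
  by_cases h : a ∈ M
  · rwa [PySem.Set.add_of_mem h]
  · rw [PySem.Set.add_of_not_mem h]
    refine List.Nodup.append hM (List.nodup_singleton a) ?_
    intro x hx hx'
    simp only [List.mem_singleton] at hx'
    exact h (hx' ▸ hx)

theorem pv_mem_add (M : List Int) (a x : Int) (hx : x ∈ M) : x ∈ PySem.Set.add M a := by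
  by_cases h : a ∈ M
  · rwa [PySem.Set.add_of_mem h]
  · rw [PySem.Set.add_of_not_mem h]; exact List.mem_append_left _ hx

theorem pv_mem_add_self (M : List Int) (a : Int) : a ∈ PySem.Set.add M a := by
  by_cases h : a ∈ M
  · rwa [PySem.Set.add_of_mem h]
  · rw [PySem.Set.add_of_not_mem h]; simp

-- pvStep on a shaped dict
theorem pv_step_items (pics : List (List (String × List String))) (M : List Int)
    (g : Int → List (Int × Int)) (d : PySem.Dict Int (List (Int × Int)))
    (hM : M.Nodup) (hd : d.items = M.map (fun m => (m, g m))) (a b : Int) (hab : a ≠ b)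
    (hga : a ∉ M → g a = []) (hgb : b ∉ M → g b = []) :
    (pvStep pics d a b).items = (PySem.Set.add (PySem.Set.add M a) b).map
      (fun m => (m, g m ++ (if a = m then [(pvScore pics a b, b)]
                            else if b = m then [(pvScore pics a b, a)] else []))) := by
  set M1 : List Int := PySem.Set.add M a with hM1
  set M2 : List Int := PySem.Set.add M1 b with hM2
  have hM1n : M1.Nodup := pv_nodup_add M hM a
  have hM2n : M2.Nodup := pv_nodup_add M1 hM1n b
  have haM1 : a ∈ M1 := pv_mem_add_self M a
  have haM2 : a ∈ M2 := pv_mem_add M1 b a haM1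
  have hbM2 : b ∈ M2 := pv_mem_add_self M1 b
  have step1 : (if d.contains a then d else d.insert a []).items
      = M1.map (fun m => (m, g m)) := by
    rw [pv_contains_shape M g d hd a]
    by_cases h : a ∈ M
    · simp only [h, decide_true, if_true]; rw [hd, hM1, PySem.Set.add_of_mem h]
    · simp only [h, decide_false]
      rw [hM1, PySem.Set.add_of_not_mem h]
      exact pv_items_insert_fresh M g d hd a h (hga h)
  set d1 := (if d.contains a then d else d.insert a []) with hd1def
  have step2 : (if d1.contains b then d1 else d1.insert b []).items
      = M2.map (fun m => (m, g m)) := by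
    rw [pv_contains_shape M1 g d1 step1 b]
    by_cases h : b ∈ M1
    · simp only [h, decide_true, if_true]; rw [step1, hM2, PySem.Set.add_of_mem h]
    · simp only [h, decide_false]
      rw [hM2, PySem.Set.add_of_not_mem h]
      have hbM : b ∉ M := fun hm => h (pv_mem_add M a b hm)
      exact pv_items_insert_fresh M1 g d1 step1 b h (hgb hbM)
  set d2 := (if d1.contains b then d1 else d1.insert b []) with hd2def
  have step3 := pv_items_modify M2 g d2 hM2n step2 a haM2
      (fun l => l ++ [(pvScore pics a b, b)])
  set g1 : Int → List (Int × Int) :=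
    fun m => if m = a then g m ++ [(pvScore pics a b, b)] else g m with hg1
  have step3' : (d2.modify a [] (fun l => l ++ [(pvScore pics a b, b)])).items
      = M2.map (fun m => (m, g1 m)) := step3
  have step4 := pv_items_modify M2 g1 _ hM2n step3' b hbM2
      (fun l => l ++ [(pvScore pics a b, a)])
  show (d2.modify a [] _ |>.modify b [] _).items = _
  rw [step4]
  apply List.map_congr_left
  intro m hm
  rcases eq_or_ne m a with rfl | hma
  · simp [hg1, hab]
  · rcases eq_or_ne m b with rfl | hmb
    · simp [hg1, hma, Ne.symm hma]
    · simp [hg1, hma, hmb, Ne.symm hma, Ne.symm hmb]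

theorem pv_entries_append_singleton (pics : List (List (String × List String)))
    (P : List (Int × Int)) (p : Int × Int) (m : Int) :
    pvEntries pics (P ++ [p]) m = pvEntries pics P m ++
      (if p.1 = m then [(pvScore pics p.1 p.2, p.2)]
       else if p.2 = m then [(pvScore pics p.1 p.2, p.1)] else []) := by
  unfold pvEntries
  rw [List.filterMap_append]
  congr 1
  simp only [List.filterMap_cons, List.filterMap_nil]
  split_ifs <;> simp

theorem pv_keys_append_singleton (P : List (Int × Int)) (p : Int × Int) :
    pvKeys (P ++ [p]) = PySem.Set.add (PySem.Set.add (pvKeys P) p.1) p.2 := by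
  unfold pvKeys
  rw [List.flatMap_append]
  rw [PySem.Set.ofList_append]
  simp only [List.flatMap_cons, List.flatMap_nil, List.append_nil]
  rw [PySem.Set.update_cons, PySem.Set.update_cons, PySem.Set.update_nil]

theorem pv_entries_nil_of_not_mem (pics : List (List (String × List String)))
    (P : List (Int × Int)) (a : Int) (ha : a ∉ pvKeys P) : pvEntries pics P a = [] := by
  have ha' : a ∉ P.flatMap (fun p => [p.1, p.2]) := by
    intro h; exact ha (by rwa [pvKeys, PySem.Set.mem_ofList])
  unfold pvEntries
  rw [List.filterMap_eq_nil_iff]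
  intro p hp
  have h1 : p.1 ≠ a := by
    intro h; exact ha' (List.mem_flatMap.mpr ⟨p, hp, by simp [h]⟩)
  have h2 : p.2 ≠ a := by
    intro h; exact ha' (List.mem_flatMap.mpr ⟨p, hp, by simp [h]⟩)
  simp [h1, h2]

theorem pv_process (pics : List (List (String × List String))) :
    ∀ (P : List (Int × Int)), (∀ p ∈ P, p.1 ≠ p.2) →
    (P.foldl (fun st p => pvStep pics st p.1 p.2) PySem.Dict.empty).items
      = (pvKeys P).map (fun m => (m, pvEntries pics P m)) := by
  intro P
  induction P using List.reverseRecOn with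
  | nil => intro _; simp [pvKeys, pvEntries, PySem.Set.ofList, PySem.Dict.empty]
  | append_singleton P p ih =>
    intro hP
    have hP' : ∀ q ∈ P, q.1 ≠ q.2 := fun q hq => hP q (List.mem_append_left _ hq)
    have hab : p.1 ≠ p.2 := hP p (List.mem_append_right _ (List.mem_singleton_self p))
    rw [List.foldl_append, List.foldl_cons, List.foldl_nil]
    rw [pv_step_items pics (pvKeys P) (pvEntries pics P) _ (PySem.Set.nodup_ofList _)
      (ih hP') p.1 p.2 hab
      (pv_entries_nil_of_not_mem pics P p.1) (pv_entries_nil_of_not_mem pics P p.2)]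
    rw [pv_keys_append_singleton]
    apply List.map_congr_left
    intro m _
    rw [pv_entries_append_singleton]

def pvPairs (n : Int) : List (Int × Int) :=
  (PySem.List.pyRange 0 n).flatMap (fun i => (PySem.List.pyRange (i + 1) n).map (fun j => (i, j)))

theorem pv_A_dict (pics : List (List (String × List String))) (n : Int) :
    (PySem.List.pyRange 0 n).foldl (fun st i =>
        (PySem.List.pyRange (i + 1) n).foldl (fun st j => pvStep pics st i j) st)
      PySem.Dict.empty
    = (pvPairs n).foldl (fun st p => pvStep pics st p.1 p.2) PySem.Dict.empty := by
  unfold pvPairs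
  rw [pv_foldl_flatMap]
  congr 1
  funext st i
  rw [List.foldl_map]

theorem pv_sort_fold (f : List (Int × Int) → List (Int × Int)) :
    ∀ (K : List Int), K.Nodup →
    ∀ (M : List Int) (g : Int → List (Int × Int)) (d : PySem.Dict Int (List (Int × Int))),
    (∀ k ∈ K, k ∈ M) → M.Nodup → d.items = M.map (fun m => (m, g m)) →
    (K.foldl (fun st idx => st.modify idx [] f) d).items
      = M.map (fun m => (m, if m ∈ K then f (g m) else g m)) := by
  intro K
  induction K with
  | nil =>
    intro _ M g d _ _ hd
    simpa using hd
  | cons k K ih =>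
    intro hK M g d hKM hM hd
    have hkK : k ∉ K := (List.nodup_cons.mp hK).1
    rw [List.foldl_cons]
    have h1 := pv_items_modify M g d hM hd k (hKM k (List.mem_cons_self)) f
    rw [ih (List.nodup_cons.mp hK).2 M _ _ (fun x hx => hKM x (List.mem_cons_of_mem _ hx)) hM h1]
    apply List.map_congr_left
    intro m _
    by_cases hmK : m ∈ K
    · have hmk : ¬ (m = k) := fun h => hkK (h ▸ hmK)
      simp [hmK, hmk]
    · by_cases hmk : m = k
      · simp [hmk, hkK]
      · simp [hmK, hmk]

theorem pv_update_of_subset (s : PySem.Set Int) (xs : List Int) (h : ∀ x ∈ xs, x ∈ s) :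
    s.update xs = s := by
  rw [PySem.Set.update_eq_append_filter]
  have hnil : List.filter (fun y => !s.contains y) (PySem.Set.ofList xs) = [] := by
    rw [List.filter_eq_nil_iff]
    intro y hy
    have hmem : y ∈ xs := (PySem.Set.mem_ofList xs y).mp hy
    simp only [Bool.not_eq_true', Bool.not_eq_false]
    exact (PySem.Set.contains_iff s y).mpr (h y hmem)
  rw [hnil, List.append_nil]

theorem pv_block (k : Nat) :
    PySem.Set.ofList ((PySem.List.pyRange 1 (2 + (k : Int))).flatMap (fun j => [0, j]))
      = PySem.List.pyRange 0 (2 + (k : Int)) := by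
  induction k with
  | zero => decide
  | succ k ih =>
    have hcast : (2 + ((k + 1 : Nat) : Int)) = (2 + (k : Int)) + 1 := by push_cast; ring
    rw [hcast, PySem.List.pyRange_one_succ_right (by omega : (1:Int) ≤ 2 + (k:Int)),
      List.flatMap_append, PySem.Set.ofList_append, ih]
    simp only [List.flatMap_cons, List.flatMap_nil, List.append_nil]
    rw [PySem.Set.update_cons, PySem.Set.update_cons, PySem.Set.update_nil]
    have h0 : PySem.Set.add (PySem.List.pyRange 0 (2 + (k:Int))) 0
        = PySem.List.pyRange 0 (2 + (k:Int)) :=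
      PySem.Set.add_of_mem (by rw [PySem.List.mem_pyRange_one]; omega)
    rw [h0]
    have h1 : PySem.Set.add (PySem.List.pyRange 0 (2 + (k:Int))) (2 + (k:Int))
        = PySem.List.pyRange 0 (2 + (k:Int)) ++ [2 + (k:Int)] :=
      PySem.Set.add_of_not_mem (by rw [PySem.List.mem_pyRange_one]; omega)
    rw [h1, ← PySem.List.pyRange_one_succ_right (by omega : (0:Int) ≤ 2 + (k:Int))]

theorem pv_mem_flatten_pairs (n : Int) (x : Int)
    (hx : x ∈ (pvPairs n).flatMap (fun p => [p.1, p.2])) : 0 ≤ x ∧ x < n := by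
  rcases List.mem_flatMap.mp hx with ⟨p, hp, hxp⟩
  rcases List.mem_flatMap.mp hp with ⟨i, hi, hpi⟩
  rcases List.mem_map.mp hpi with ⟨j, hj, rfl⟩
  rw [PySem.List.mem_pyRange_one] at hi hj
  simp only [List.mem_cons, List.not_mem_nil, or_false] at hxp
  rcases hxp with rfl | rfl <;> omega

theorem pv_keys_pairs (n : Int) (hn : 2 ≤ n) : pvKeys (pvPairs n) = PySem.List.pyRange 0 n := by
  obtain ⟨k, rfl⟩ : ∃ k : Nat, n = 2 + (k : Int) :=
    ⟨(n - 2).toNat, by omega⟩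
  unfold pvKeys
  rw [show pvPairs (2 + (k:Int))
      = ((PySem.List.pyRange 1 (2 + (k:Int))).map (fun j => ((0:Int), j)))
        ++ (PySem.List.pyRange 1 (2 + (k:Int))).flatMap
            (fun i => (PySem.List.pyRange (i + 1) (2 + (k:Int))).map (fun j => (i, j)))
    from by
      unfold pvPairs
      rw [PySem.List.pyRange_one_cons (by omega : (0:Int) < 2 + (k:Int))]
      rw [List.flatMap_cons]
      norm_num]
  rw [List.flatMap_append, PySem.Set.ofList_append]
  rw [List.flatMap_map]
  have hblock : (List.flatMap (fun a => [((0:Int), a).1, ((0:Int), a).2])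
        (PySem.List.pyRange 1 (2 + (k:Int))))
      = (PySem.List.pyRange 1 (2 + (k:Int))).flatMap (fun j => [0, j]) := rfl
  rw [hblock, pv_block k]
  apply pv_update_of_subset
  intro x hx
  rw [PySem.List.mem_pyRange_one]
  have : x ∈ (pvPairs (2 + (k:Int))).flatMap (fun p => [p.1, p.2]) := by
    apply List.mem_flatMap.mpr
    rcases List.mem_flatMap.mp hx with ⟨p, hp, hxp⟩
    refine ⟨p, ?_, hxp⟩
    unfold pvPairs
    rw [PySem.List.pyRange_one_cons (by omega : (0:Int) < 2 + (k:Int))]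
    rw [List.flatMap_cons]
    exact List.mem_append_right _ hp
  exact pv_mem_flatten_pairs _ x this

def pvRow (pics : List (List (String × List String))) (n m : Int) : List (Int × Int) :=
  (PySem.List.pyRange 0 m).map (fun k => (pvScore pics k m, k))
    ++ (PySem.List.pyRange (m + 1) n).map (fun j => (pvScore pics m j, j))

theorem pv_filterMap_single (m : Int) (v : Int × Int) :
    ∀ (l : List Int), l.Nodup →
    l.filterMap (fun j => if j = m then some v else none)
      = if m ∈ l then [v] else [] := by
  intro l
  induction l with
  | nil => simp
  | cons x xs ih =>
    intro hn
    rw [List.filterMap_cons]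
    by_cases hx : x = m
    · subst hx
      have hxm : x ∉ xs := (List.nodup_cons.mp hn).1
      rw [ih (List.nodup_cons.mp hn).2]
      simp [hxm]
    · simp only [if_neg hx]
      rw [ih (List.nodup_cons.mp hn).2]
      by_cases hm : m ∈ xs
      · simp [hm]
      · have hnx : m ∉ x :: xs := by
          intro hc
          rcases List.mem_cons.mp hc with h | h
          · exact hx h.symm
          · exact hm h
        simp [hm, hnx]

theorem pv_flatMap_singleton {γ β : Type} (l : List γ) (f : γ → List β) (g : γ → β)
    (h : ∀ x ∈ l, f x = [g x]) : l.flatMap f = l.map g := by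
  induction l with
  | nil => simp
  | cons x xs ih =>
    rw [List.flatMap_cons, List.map_cons, h x List.mem_cons_self,
      ih (fun y hy => h y (List.mem_cons_of_mem _ hy))]
    rfl

theorem pv_flatMap_nil {γ β : Type} (l : List γ) (f : γ → List β)
    (h : ∀ x ∈ l, f x = []) : l.flatMap f = [] := by
  induction l with
  | nil => simp
  | cons x xs ih =>
    rw [List.flatMap_cons, h x List.mem_cons_self, ih (fun y hy => h y (List.mem_cons_of_mem _ hy))]
    rfl

theorem pv_entries_pairs (pics : List (List (String × List String))) (n m : Int)
    (hm0 : 0 ≤ m) (hmn : m < n) :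
    pvEntries pics (pvPairs n) m = pvRow pics n m := by
  unfold pvEntries pvPairs
  rw [List.filterMap_flatMap]
  have hinner : ∀ i : Int, (List.filterMap
      (fun p : Int × Int => if p.1 = m then some (pvScore pics p.1 p.2, p.2)
        else if p.2 = m then some (pvScore pics p.1 p.2, p.1) else none)
      ((PySem.List.pyRange (i + 1) n).map (fun j => (i, j))))
      = (PySem.List.pyRange (i + 1) n).filterMap
        (fun j => if i = m then some (pvScore pics i j, j)
          else if j = m then some (pvScore pics i m, i) else none) := by
    intro i
    rw [List.filterMap_map]
    apply List.filterMap_congr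
    intro j _
    by_cases hi : i = m
    · simp [hi]
    · simp only [Function.comp, hi]
      by_cases hj : j = m
      · simp [hj]
      · simp [hj]
  simp only [hinner]
  rw [PySem.List.pyRange_one_append 0 m n hm0 (by omega),
    PySem.List.pyRange_one_cons hmn, List.flatMap_append, List.flatMap_cons]
  have hpart1 : (PySem.List.pyRange 0 m).flatMap
      (fun i => (PySem.List.pyRange (i + 1) n).filterMap
        (fun j => if i = m then some (pvScore pics i j, j)
          else if j = m then some (pvScore pics i m, i) else none))
      = (PySem.List.pyRange 0 m).map (fun i => (pvScore pics i m, i)) := by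
    apply pv_flatMap_singleton
    intro i hi
    rw [PySem.List.mem_pyRange_one] at hi
    have him : ¬ (i = m) := by omega
    simp only [if_neg him]
    rw [pv_filterMap_single m _ _ (PySem.List.nodup_pyRange_one _ _)]
    rw [if_pos (by rw [PySem.List.mem_pyRange_one]; omega)]
  have hmid : (PySem.List.pyRange (m + 1) n).filterMap
      (fun j => if m = m then some (pvScore pics m j, j)
        else if j = m then some (pvScore pics m m, m) else none)
      = (PySem.List.pyRange (m + 1) n).map (fun j => (pvScore pics m j, j)) := by
    simp
  have hpart3 : (PySem.List.pyRange (m + 1) n).flatMap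
      (fun i => (PySem.List.pyRange (i + 1) n).filterMap
        (fun j => if i = m then some (pvScore pics i j, j)
          else if j = m then some (pvScore pics i m, i) else none))
      = [] := by
    apply pv_flatMap_nil
    intro i hi
    rw [PySem.List.mem_pyRange_one] at hi
    have him : ¬ (i = m) := by omega
    simp only [if_neg him]
    rw [pv_filterMap_single m _ _ (PySem.List.nodup_pyRange_one _ _)]
    rw [if_neg (by rw [PySem.List.mem_pyRange_one]; omega)]
  rw [hpart1, hmid, hpart3, List.append_nil]
  rfl

theorem pv_tags_nodup (pics : List (List (String × List String))) (k : Int) :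
    (pvTagsAt pics k).Nodup := by
  unfold pvTagsAt; exact PySem.Set.nodup_ofList _

theorem pv_score_symm (pics : List (List (String × List String))) (i j : Int) :
    pvScore pics i j = pvScore pics j i := by
  simp only [pvScore]
  rw [pv_inter_len (pvTagsAt pics i) (pvTagsAt pics j) (pv_tags_nodup pics i) (pv_tags_nodup pics j)]
  rw [min_comm (PySem.Set.len (pvTagsAt pics i) - _) (PySem.Set.len (pvTagsAt pics j) - _)]

-- ========== B-side: inverted index and counter ==========

def pvIndex (pics : List (List (String × List String))) : PySem.Dict String (List Int) :=
  (PySem.List.pyRange 0 (pics.length : Int)).foldl (fun index i =>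
    (pvTagsAt pics i).foldl (fun index t => index.modify t [] (fun l => l ++ [i])) index)
    PySem.Dict.empty

def pvCnt (pics : List (List (String × List String))) (i : Int) : PySem.Dict Int Int :=
  (pvTagsAt pics i).foldl (fun c t =>
    ((pvIndex pics).getD t []).foldl (fun c k => c.modify k 0 (fun v => v + 1)) c)
    PySem.Dict.empty

theorem pv_flatMap_ite {γ : Type} (p : γ → Bool) (l : List γ) :
    l.flatMap (fun x => if p x then [x] else []) = l.filter p := by
  induction l with
  | nil => rfl
  | cons x xs ih =>
    rw [List.flatMap_cons, ih, List.filter_cons]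
    by_cases h : p x <;> simp [h]

theorem pv_sum_ite {γ : Type} (p : γ → Bool) (l : List γ) :
    (l.map (fun t => if p t then 1 else 0)).sum = (l.filter p).length := by
  induction l with
  | nil => rfl
  | cons x xs ih =>
    rw [List.map_cons, List.sum_cons, ih, List.filter_cons]
    by_cases h : p x <;> simp [h, Nat.add_comm]

theorem pv_bucket (pics : List (List (String × List String))) (t : String) (i : Int) :
    (((pvTagsAt pics i).map (fun t' => (t', i))).filter (fun p => p.1 == t)).map (fun p => p.2)
      = if (pvTagsAt pics i).contains t then [i] else [] := by
  rw [List.filter_map, List.map_map]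
  have hcomp : ((fun (p : String × Int) => p.1 == t) ∘ (fun t' => (t', i)))
      = fun t' => t' == t := rfl
  rw [hcomp, List.filter_beq]
  by_cases h : t ∈ pvTagsAt pics i
  · rw [List.count_eq_one_of_mem (pv_tags_nodup pics i) h,
      if_pos ((PySem.Set.contains_iff _ _).mpr h)]
    rfl
  · rw [List.count_eq_zero.mpr h,
      if_neg (fun hc => h ((PySem.Set.contains_iff _ _).mp hc))]
    rfl

theorem pv_index_getD (pics : List (List (String × List String))) (t : String) :
    (pvIndex pics).getD t []
      = (PySem.List.pyRange 0 (pics.length : Int)).filter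
          (fun i => (pvTagsAt pics i).contains t) := by
  have hidx : pvIndex pics
      = ((PySem.List.pyRange 0 (pics.length : Int)).flatMap
          (fun i => (pvTagsAt pics i).map (fun t' => (t', i)))).foldl
          (fun d p => d.modify p.1 [] (fun l => l ++ [p.2])) PySem.Dict.empty := by
    unfold pvIndex
    rw [pv_foldl_flatMap]
    refine PySem.List.foldl_congr_mem _ _ _ _ ?_
    intro acc i _
    exact (List.foldl_map (f := fun t' => (t', i))
      (g := fun (d : PySem.Dict String (List Int)) (p : String × Int) =>
        d.modify p.1 [] (fun l => l ++ [p.2]))).symm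
  rw [hidx, PySem.Dict.getD_foldl_modify_append, PySem.Dict.getD_empty, List.nil_append]
  rw [List.filter_flatMap, List.map_flatMap]
  rw [show (fun a => List.map (fun (p : String × Int) => p.2)
        (List.filter (fun p => p.1 == t) ((pvTagsAt pics a).map (fun t' => (t', a)))))
      = fun a => if (pvTagsAt pics a).contains t then [a] else []
    from funext (fun a => pv_bucket pics t a)]
  exact pv_flatMap_ite _ _

theorem pv_count_bucket (pics : List (List (String × List String))) (t : String) (k : Int)
    (hk : k ∈ PySem.List.pyRange 0 (pics.length : Int)) :
    List.count k ((pvIndex pics).getD t [])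
      = if (pvTagsAt pics k).contains t then 1 else 0 := by
  rw [pv_index_getD]
  by_cases h : (pvTagsAt pics k).contains t
  · have h' : (fun i => (pvTagsAt pics i).contains t) k = true := h
    rw [if_pos h, List.count_filter (p := fun i => (pvTagsAt pics i).contains t) h',
      List.count_eq_one_of_mem (PySem.List.nodup_pyRange_one _ _) hk]
  · rw [if_neg h, List.count_eq_zero.mpr]
    intro hmem
    exact h (List.of_mem_filter (p := fun i => (pvTagsAt pics i).contains t) hmem)

theorem pv_cnt_getD (pics : List (List (String × List String))) (i k : Int)
    (hk : k ∈ PySem.List.pyRange 0 (pics.length : Int)) :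
    (pvCnt pics i).getD k 0
      = PySem.Set.len (PySem.Set.inter (pvTagsAt pics i) (pvTagsAt pics k)) := by
  have h1 : pvCnt pics i
      = ((pvTagsAt pics i).flatMap (fun t => (pvIndex pics).getD t [])).foldl
          (fun c k => c.modify k 0 (fun v => v + 1)) (PySem.Dict.empty : PySem.Dict Int Int) := by
    unfold pvCnt
    exact (pv_foldl_flatMap (fun t => (pvIndex pics).getD t [])
      (fun (c : PySem.Dict Int Int) k => c.modify k 0 (fun v => v + 1)) (pvTagsAt pics i)
      PySem.Dict.empty).symm
  rw [h1, PySem.Dict.getD_foldl_modify_add_one, PySem.Dict.getD_empty, List.count_flatMap]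
  have hmap : List.map (List.count k ∘ fun t => (pvIndex pics).getD t []) (pvTagsAt pics i)
      = List.map (fun t => if (pvTagsAt pics k).contains t then 1 else 0) (pvTagsAt pics i) :=
    List.map_congr_left (fun t _ => pv_count_bucket pics t k hk)
  rw [hmap, pv_sum_ite]
  have hfil : List.filter (fun x => (pvTagsAt pics k).contains x) (pvTagsAt pics i)
      = PySem.Set.inter (pvTagsAt pics i) (pvTagsAt pics k) := rfl
  rw [hfil]
  simp [PySem.Set.len]

def pvRowB (pics : List (List (String × List String))) (n i : Int) : List (Int × Int) :=
  ((PySem.List.pyRange 0 n).filter (fun k => !decide (k = i))).map (fun k => (pvScore pics i k, k))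

-- B unfolded, with the index and counter folds named
theorem pv_B_unfold (pics : List (List (String × List String))) :
    get_score_table_alt pics
      = if (pics.length : Int) < 2 then [] else
        (PySem.List.pyRange 0 (pics.length : Int)).foldl (fun table i =>
          table ++ [(i, PySem.List.sorted
            ((PySem.List.pyRange 0 (pics.length : Int)).foldl (fun row k =>
              if k = i then row
              else
                let r := (pvCnt pics i).getD k 0
                row ++ [(min r (min (PySem.Set.len (pvTagsAt pics i) - r)
                  (PySem.Set.len (pvTagsAt pics k) - r)), k)]) [])
            (fun x => -x.1) false)]) [] := rfl

theorem pv_B_eq (pics : List (List (String × List String))) :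
    get_score_table_alt pics
      = if (pics.length : Int) < 2 then [] else
        (PySem.List.pyRange 0 (pics.length : Int)).foldl (fun table i =>
          table ++ [(i, PySem.List.sorted (pvRowB pics (pics.length : Int) i)
            (fun x => -x.1) false)]) [] := by
  rw [pv_B_unfold]
  by_cases h2 : (pics.length : Int) < 2
  · rw [if_pos h2, if_pos h2]
  · rw [if_neg h2, if_neg h2]
    apply PySem.List.foldl_congr_mem
    intro table i _
    have hrow : (PySem.List.pyRange 0 (pics.length : Int)).foldl (fun row k =>
          if k = i then row
          else
            let r := (pvCnt pics i).getD k 0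
            row ++ [(min r (min (PySem.Set.len (pvTagsAt pics i) - r)
              (PySem.Set.len (pvTagsAt pics k) - r)), k)]) []
        = pvRowB pics (pics.length : Int) i := by
      rw [PySem.List.foldl_congr_mem _ _
        (fun row k => if k = i then row else row ++ [(pvScore pics i k, k)]) _ ?_]
      · rw [pv_foldl_skip (fun k => k = i) (fun k => (pvScore pics i k, k)), List.nil_append]
        rfl
      · intro row k hk
        by_cases hki : k = i
        · simp [hki]
        · simp only [if_neg hki]
          rw [pv_cnt_getD pics i k hk]
          rfl
    rw [hrow]

theorem pv_filter_ne (n m : Int) (h0 : 0 ≤ m) (hn : m < n) :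
    (PySem.List.pyRange 0 n).filter (fun k => !decide (k = m))
      = PySem.List.pyRange 0 m ++ PySem.List.pyRange (m + 1) n := by
  rw [PySem.List.pyRange_one_append 0 m n h0 (by omega), PySem.List.pyRange_one_cons hn]
  rw [List.filter_append, List.filter_cons]
  simp only [decide_true, Bool.not_true]
  have h1 : (PySem.List.pyRange 0 m).filter (fun k => !decide (k = m)) = PySem.List.pyRange 0 m := by
    rw [List.filter_eq_self]
    intro k hk
    rw [PySem.List.mem_pyRange_one] at hk
    simp only [Bool.not_eq_true', decide_eq_false_iff_not]
    omega
  have h2 : (PySem.List.pyRange (m + 1) n).filter (fun k => !decide (k = m))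
      = PySem.List.pyRange (m + 1) n := by
    rw [List.filter_eq_self]
    intro k hk
    rw [PySem.List.mem_pyRange_one] at hk
    simp only [Bool.not_eq_true', decide_eq_false_iff_not]
    omega
  rw [h1, h2]
  simp

theorem pv_rowB_eq_row (pics : List (List (String × List String))) (n m : Int)
    (h0 : 0 ≤ m) (hn : m < n) : pvRowB pics n m = pvRow pics n m := by
  unfold pvRowB pvRow
  rw [pv_filter_ne n m h0 hn, List.map_append]
  congr 1
  apply List.map_congr_left
  intro k _
  rw [pv_score_symm]

theorem pv_pairs_small (n : Int) (hn : n ≤ 1) : pvPairs n = [] := by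
  unfold pvPairs
  apply pv_flatMap_nil
  intro i hi
  rw [PySem.List.mem_pyRange_one] at hi
  rw [PySem.List.pyRange_one_eq_nil (by omega)]
  rfl

theorem pv_A_char (pics : List (List (String × List String))) :
    get_score_table pics = (pvKeys (pvPairs (pics.length : Int))).map
      (fun m => (m, PySem.List.sorted (pvEntries pics (pvPairs (pics.length : Int)) m)
        (fun x => -x.1) false)) := by
  have hpairs_ne : ∀ p ∈ pvPairs (pics.length : Int), p.1 ≠ p.2 := by
    intro p hp
    rcases List.mem_flatMap.mp hp with ⟨i, hi, hpi⟩
    rcases List.mem_map.mp hpi with ⟨j, hj, rfl⟩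
    rw [PySem.List.mem_pyRange_one] at hi hj
    simp only [ne_eq]
    omega
  have hA0 : get_score_table pics
      = (((pvPairs (pics.length : Int)).foldl (fun st p => pvStep pics st p.1 p.2)
            PySem.Dict.empty).keys.foldl
          (fun st idx => st.modify idx [] (fun l => PySem.List.sorted l (fun x => -x.1) false))
          ((pvPairs (pics.length : Int)).foldl (fun st p => pvStep pics st p.1 p.2)
            PySem.Dict.empty)).items := by
    rw [show get_score_table pics
        = ((((PySem.List.pyRange 0 (pics.length : Int)).foldl (fun st i =>
              (PySem.List.pyRange (i + 1) (pics.length : Int)).foldl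
                (fun st j => pvStep pics st i j) st) PySem.Dict.empty)).keys.foldl
            (fun st idx => st.modify idx [] (fun l => PySem.List.sorted l (fun x => -x.1) false))
            (((PySem.List.pyRange 0 (pics.length : Int)).foldl (fun st i =>
              (PySem.List.pyRange (i + 1) (pics.length : Int)).foldl
                (fun st j => pvStep pics st i j) st) PySem.Dict.empty))).items from rfl]
    rw [pv_A_dict pics (pics.length : Int)]
  rw [hA0]
  have hitems := pv_process pics (pvPairs (pics.length : Int)) hpairs_ne
  have hkeys := pv_keys_shape (pvKeys (pvPairs (pics.length : Int))) _ _ hitems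
  have hnodup : (pvKeys (pvPairs (pics.length : Int))).Nodup := PySem.Set.nodup_ofList _
  rw [hkeys]
  rw [pv_sort_fold (fun l => PySem.List.sorted l (fun x => -x.1) false)
    (pvKeys (pvPairs (pics.length : Int))) hnodup
    (pvKeys (pvPairs (pics.length : Int))) (pvEntries pics (pvPairs (pics.length : Int)))
    _ (fun k hk => hk) hnodup hitems]
  apply List.map_congr_left
  intro m hm
  rw [if_pos hm]

theorem pv_main (pics : List (List (String × List String))) :
    get_score_table pics = get_score_table_alt pics := by
  rw [pv_A_char pics, pv_B_eq pics]
  by_cases h2 : 2 ≤ (pics.length : Int)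
  · rw [if_neg (by omega)]
    rw [pv_keys_pairs _ h2]
    rw [PySem.List.foldl_congr_mem _ _
      (fun table i => table ++ [(i, PySem.List.sorted (pvRow pics (pics.length : Int) i)
        (fun x => -x.1) false)]) _ ?_]
    · rw [PySem.List.foldl_append_singleton_eq_map, List.nil_append]
      apply List.map_congr_left
      intro m hm
      rw [PySem.List.mem_pyRange_one] at hm
      rw [pv_entries_pairs pics _ m hm.1 hm.2]
    · intro table i hi
      rw [PySem.List.mem_pyRange_one] at hi
      rw [pv_rowB_eq_row pics _ i hi.1 hi.2]
  · rw [if_pos (by omega), pv_pairs_small _ (by omega)]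
    rfl

-- ===== VERDICT (by name: the statement is the Claim_ definition above) =====
theorem get_score_table_spec : Claim_equal_get_score_table := by
  intro pics _ _
  unfold Spec_get_score_table
  exact pv_main pics
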